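-- pv_equiv track=rewrite | github.com/ManuelEitel/opp_public | tests/other_tests.py | order_current_steps
-- ===== SOURCE A (Python) =====
-- def order_current_steps(all_non_deprecated_user_tasks: list) -> list:
--
--     ### test ###
--     if len(all_non_deprecated_user_tasks) == 1:
--         return all_non_deprecated_user_tasks
--
--     else:
--         sorted_tasks = sorted(all_non_deprecated_user_tasks)
--         grouped_tasks = {}
--         for task in sorted_tasks:
--             key = task[0]
--             if key not in grouped_tasks:
--                 grouped_tasks[key] = []
--             grouped_tasks[key].append(task)
--         return_list = [sorted(group, key=lambda x: x[3]) for group in grouped_tasks.values()]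
--
--         return return_list
-- ===== SOURCE B (Python) =====
-- def order_current_steps(all_non_deprecated_user_tasks: list) -> list:
--     if len(all_non_deprecated_user_tasks) == 1:
--         return all_non_deprecated_user_tasks
--     keys = sorted({task[0] for task in all_non_deprecated_user_tasks})
--     return [sorted((t for t in all_non_deprecated_user_tasks if t[0] == key),
--                    key=lambda x: (x[3], x))
--             for key in keys]
-- ===== Notes on version B (the rewrite author's own statement) =====
-- stated objective: alternative
-- what changed: B discards A's global sort + dict-of-lists grouping loop + per-group stable key sort: it collects the distinct first elements into a set, sorts those keys, and builds each group directly by one filter pass over the unsorted input followed by a single composite-key sort on (x[3], x) (equal to A's stable x[3]-sort of the lexicographically pre-sorted group).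
-- outside the precondition, e.g. on order_current_steps([[1, 2, 3, 4]]): A returns [[1, 2, 3, 4]], B returns [[1, 2, 3, 4]]; on order_current_steps([[1, 2], [1, 2]]): A raises IndexError, B raises IndexError
import Mathlib
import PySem

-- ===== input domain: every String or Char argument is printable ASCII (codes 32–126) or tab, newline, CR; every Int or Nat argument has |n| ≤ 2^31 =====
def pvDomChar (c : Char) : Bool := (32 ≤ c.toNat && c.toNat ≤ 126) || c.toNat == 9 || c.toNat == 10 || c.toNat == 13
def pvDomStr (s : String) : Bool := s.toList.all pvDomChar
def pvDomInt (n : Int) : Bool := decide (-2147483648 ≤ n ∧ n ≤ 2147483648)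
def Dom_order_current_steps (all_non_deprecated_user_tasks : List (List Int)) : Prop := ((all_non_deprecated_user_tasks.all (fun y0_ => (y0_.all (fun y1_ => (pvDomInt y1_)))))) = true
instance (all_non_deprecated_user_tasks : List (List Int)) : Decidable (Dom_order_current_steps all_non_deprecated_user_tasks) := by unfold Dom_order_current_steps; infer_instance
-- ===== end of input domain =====

-- B drops the global sort and the dict-of-lists grouping loop entirely: it collects the
-- distinct first elements into a set, and builds each group by one filter pass over the
-- original list followed by a single composite-key sort on (x[3], x) (alternative algorithm).

-- ===== PORT A =====
def order_current_steps (all_non_deprecated_user_tasks : List (List Int)) : List (List (List Int)) :=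
  if all_non_deprecated_user_tasks.length = 1 then
    -- Python returns the input list itself here: a list of tasks, one nesting level
    -- shallower than the declared return type, so not representable; excluded by Pre_.
    []
  else
    let sorted_tasks := PySem.List.sorted all_non_deprecated_user_tasks (fun x => x) false
    let grouped_tasks := sorted_tasks.foldl
      (fun (d : PySem.Dict Int (List (List Int))) task =>
        let key := PySem.List.pyGetD task 0 0   -- task[0]; in range under Pre_
        let d' := if d.contains key then d else d.insert key []
        d'.modify key [] (fun g => g ++ [task]))
      PySem.Dict.empty
    (PySem.Dict.values grouped_tasks).map
      (fun group => PySem.List.sorted group (fun x => PySem.List.pyGetD x 3 0) false)   -- x[3]; in range under Pre_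

-- ===== PORT B =====
def order_current_steps_alt (all_non_deprecated_user_tasks : List (List Int)) : List (List (List Int)) :=
  if all_non_deprecated_user_tasks.length = 1 then
    []  -- same untypeable early return as A; excluded by Pre_
  else
    let keys := PySem.List.sorted
      (PySem.Set.ofList (all_non_deprecated_user_tasks.map (fun task => PySem.List.pyGetD task 0 0)))
      (fun x => x) false
    keys.map (fun key =>
      PySem.List.sorted2
        (all_non_deprecated_user_tasks.filter (fun t => PySem.List.pyGetD t 0 0 == key))
        (fun x => PySem.List.pyGetD x 3 0) (fun x => x) false)   -- key=lambda x: (x[3], x)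

-- ===== PRECONDITION & SPEC =====
-- Pre_ excludes singleton inputs, where A's early return is the ungrouped task list (one
-- nesting level shallower than the declared return type), and inputs containing a task of
-- fewer than 4 elements, on which A raises IndexError (task[0] or the key lookup x[3]).
def Pre_order_current_steps (all_non_deprecated_user_tasks : List (List Int)) : Prop :=
  all_non_deprecated_user_tasks.length ≠ 1 ∧
  ∀ t ∈ all_non_deprecated_user_tasks, 4 ≤ t.length
instance (all_non_deprecated_user_tasks : List (List Int)) : Decidable (Pre_order_current_steps all_non_deprecated_user_tasks) := by unfold Pre_order_current_steps; infer_instance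

def pvWitness_order_current_steps : List (List Int) :=
  [[2, 0, 0, 9], [1, 0, 0, 5], [2, 0, 0, 3], [1, 0, 0, 1]]

def Spec_order_current_steps (all_non_deprecated_user_tasks : List (List Int)) (out : List (List (List Int))) : Prop := out = order_current_steps_alt all_non_deprecated_user_tasks
instance (all_non_deprecated_user_tasks : List (List Int)) (out : List (List (List Int))) : Decidable (Spec_order_current_steps all_non_deprecated_user_tasks out) := by unfold Spec_order_current_steps; infer_instance

-- ===== CLAIM (what is proved, stated in full; the proofs are below) =====
def Claim_equal_order_current_steps : Prop := ∀ (all_non_deprecated_user_tasks : List (List Int)), Dom_order_current_steps all_non_deprecated_user_tasks → Pre_order_current_steps all_non_deprecated_user_tasks → Spec_order_current_steps all_non_deprecated_user_tasks (order_current_steps all_non_deprecated_user_tasks)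

-- ===== LEMMAS AND PROOFS =====

def pvK0 (t : List Int) : Int := PySem.List.pyGetD t 0 0
def pvK3 (t : List Int) : Int := PySem.List.pyGetD t 3 0

-- the composite order that sorted(key=lambda x: (x[3], x)) realises (lex ≤/< on List Int)
def pvR (a b : List Int) : Prop := pvK3 a < pvK3 b ∨ (pvK3 a = pvK3 b ∧ a ≤ b)

lemma pv_stepA_eq_modify (d : PySem.Dict Int (List (List Int))) (task : List Int) :
    (let key := PySem.List.pyGetD task 0 0
     let d' := if d.contains key then d else d.insert key []
     d'.modify key [] (fun g => g ++ [task]))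
      = d.modify (PySem.List.pyGetD task 0 0) [] (fun g => g ++ [task]) := by
  by_cases h : d.contains (PySem.List.pyGetD task 0 0)
  · simp [h]
  · have hget : d.get? (PySem.List.pyGetD task 0 0) = none :=
      (PySem.Dict.get?_eq_none_iff_not_mem_keys d _).mpr
        (fun hm => h ((PySem.Dict.contains_iff_mem_keys d _).mpr hm))
    simp only [h, Bool.false_eq_true, if_false, PySem.Dict.modify,
      PySem.Dict.getD_insert_self, PySem.Dict.insert_insert_self]
    congr 1
    simp [PySem.Dict.getD, hget]

lemma pv_ofList_sublist {α : Type} [BEq α] (l : List α) :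
    (PySem.Set.ofList l).Sublist l := by
  have key : ∀ (l acc : List α), (l.foldl PySem.Set.add acc).Sublist (acc ++ l) := by
    intro l
    induction l with
    | nil => intro acc; simp
    | cons x t ih =>
      intro acc
      simp only [List.foldl_cons]
      have h2 := ih (PySem.Set.add acc x)
      by_cases hc : acc.contains x
      · have he : PySem.Set.add acc x = acc := by
          simp [PySem.Set.add, PySem.Set.contains, hc]
        rw [he] at h2 ⊢
        exact h2.trans (List.Sublist.append_left (List.sublist_cons_self x t) acc)
      · have he : PySem.Set.add acc x = acc ++ [x] := by
          simp [PySem.Set.add, PySem.Set.contains, hc]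
        rw [he] at h2 ⊢
        simpa using h2
  simpa using key l []

lemma pvKey_cons (x : Int) (l : List Int) : pvK0 (x :: l) = x := by
  simp [pvK0, PySem.List.pyGetD, PySem.List.pyGet?, PySem.List.pyIdx?]

lemma pv_head_le (a b : List Int) (hab : a ≤ b) (ha : a ≠ []) : pvK0 a ≤ pvK0 b := by
  cases a with
  | nil => exact absurd rfl ha
  | cons x l =>
    cases b with
    | nil =>
      exact absurd hab (by simp [List.nil_lt_cons x l])
    | cons y m =>
      rw [pvKey_cons, pvKey_cons]
      rcases le_iff_lt_or_eq.mp hab with h | h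
      · rcases List.cons_lt_cons_iff.mp h with h | ⟨h1, _⟩
        · exact le_of_lt h
        · exact le_of_eq h1
      · cases h; rfl

lemma pv_insertBy_cons (before : List Int → List Int → Bool) (x y : List Int) (ys : List (List Int)) :
    PySem.List.insertBy before x (y :: ys)
      = if before x y then x :: y :: ys else y :: PySem.List.insertBy before x ys := rfl

lemma pvR_k3_le {a b : List Int} (h : pvR a b) : pvK3 a ≤ pvK3 b := by
  rcases h with h | ⟨h, _⟩ <;> omega

-- inserting x by A's x[3]-only comparison keeps the accumulator pvR-sorted as long as
-- every accumulated element precedes x lexicographically (= the stability of sorted)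
lemma pv_insA (before : List Int → List Int → Bool)
    (hb : ∀ a b, before a b = true ↔ pvK3 a < pvK3 b)
    (x : List Int) (acc : List (List Int))
    (hacc : acc.Pairwise pvR) (hle : ∀ a ∈ acc, a ≤ x) :
    (PySem.List.insertBy before x acc).Pairwise pvR := by
  induction acc with
  | nil => simp [PySem.List.insertBy]
  | cons y ys ih =>
    rw [pv_insertBy_cons]
    rcases List.pairwise_cons.mp hacc with ⟨hy, hys⟩
    by_cases hbxy : before x y
    · rw [if_pos hbxy]
      have hxy : pvK3 x < pvK3 y := (hb x y).mp hbxy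
      refine List.pairwise_cons.mpr ⟨?_, hacc⟩
      intro w hw
      rcases hw with _ | hw
      · exact Or.inl hxy
      · exact Or.inl (lt_of_lt_of_le hxy (pvR_k3_le (hy w (by assumption))))
    · rw [if_neg hbxy]
      have hyx : pvK3 y ≤ pvK3 x := by
        have := (hb x y).not.mp hbxy; omega
      refine List.pairwise_cons.mpr ⟨?_, ?_⟩
      · intro w hw
        rcases (PySem.List.insertBy_mem_iff before x w ys).mp hw with rfl | hw
        · rcases lt_or_eq_of_le hyx with h | h
          · exact Or.inl h
          · exact Or.inr ⟨h, hle y (by simp)⟩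
        · exact hy w hw
      · exact ih hys (fun a ha => hle a (by simp [ha]))

-- inserting by B's composite (x[3], x) comparison keeps pvR-sortedness unconditionally
lemma pv_insB (before : List Int → List Int → Bool)
    (hb : ∀ a b, before a b = true ↔ (pvK3 a < pvK3 b ∨ (¬ pvK3 b < pvK3 a ∧ a < b)))
    (x : List Int) (acc : List (List Int))
    (hacc : acc.Pairwise pvR) :
    (PySem.List.insertBy before x acc).Pairwise pvR := by
  induction acc with
  | nil => simp [PySem.List.insertBy]
  | cons y ys ih =>
    rw [pv_insertBy_cons]
    rcases List.pairwise_cons.mp hacc with ⟨hy, hys⟩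
    by_cases hbxy : before x y
    · rw [if_pos hbxy]
      have hxy : pvK3 x < pvK3 y ∨ (pvK3 x = pvK3 y ∧ x < y) := by
        rcases (hb x y).mp hbxy with h | ⟨h1, h2⟩
        · exact Or.inl h
        · rcases lt_or_eq_of_le (show pvK3 x ≤ pvK3 y by omega) with h | h
          · exact Or.inl h
          · exact Or.inr ⟨h, h2⟩
      refine List.pairwise_cons.mpr ⟨?_, hacc⟩
      intro w hw
      have hRyw : w = y ∨ pvR y w := by
        rcases hw with _ | hw
        · exact Or.inl rfl
        · exact Or.inr (hy w (by assumption))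
      rcases hxy with h | ⟨he, hlt⟩
      · rcases hRyw with rfl | hyw
        · exact Or.inl h
        · exact Or.inl (lt_of_lt_of_le h (pvR_k3_le hyw))
      · rcases hRyw with rfl | hyw
        · exact Or.inr ⟨he, le_of_lt hlt⟩
        · rcases hyw with h | ⟨h1, h2⟩
          · exact Or.inl (by omega)
          · exact Or.inr ⟨by omega, le_of_lt (lt_of_lt_of_le hlt h2)⟩
    · rw [if_neg hbxy]
      have hyx : pvR y x := by
        have h := (hb x y).not.mp hbxy
        push Not at h
        rcases h with ⟨h1, h2⟩
        have h1' : pvK3 y ≤ pvK3 x := by omega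
        rcases lt_or_eq_of_le h1' with h | h
        · exact Or.inl h
        · rcases h2 (by omega) with h2'
          exact Or.inr ⟨h, le_of_not_gt (by simpa using h2')⟩
      refine List.pairwise_cons.mpr ⟨?_, ih hys⟩
      intro w hw
      rcases (PySem.List.insertBy_mem_iff before x w ys).mp hw with rfl | hw
      · exact hyx
      · exact hy w hw

lemma pv_foldA (before : List Int → List Int → Bool)
    (hb : ∀ a b, before a b = true ↔ pvK3 a < pvK3 b) :
    ∀ (l acc : List (List Int)), l.Pairwise (· ≤ ·) → acc.Pairwise pvR →
      (∀ a ∈ acc, ∀ x ∈ l, a ≤ x) →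
      (l.foldl (fun acc x => PySem.List.insertBy before x acc) acc).Pairwise pvR := by
  intro l
  induction l with
  | nil => intro acc _ hacc _; simpa using hacc
  | cons x t ih =>
    intro acc hl hacc hmix
    simp only [List.foldl_cons]
    rcases List.pairwise_cons.mp hl with ⟨hx, ht⟩
    refine ih _ ht (pv_insA before hb x acc hacc (fun a ha => hmix a ha x (by simp))) ?_
    intro a ha z hz
    rcases (PySem.List.insertBy_mem_iff before x a acc).mp ha with rfl | ha
    · exact hx z hz
    · exact hmix a ha z (by simp [hz])

lemma pv_foldB (before : List Int → List Int → Bool)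
    (hb : ∀ a b, before a b = true ↔ (pvK3 a < pvK3 b ∨ (¬ pvK3 b < pvK3 a ∧ a < b))) :
    ∀ (l acc : List (List Int)), acc.Pairwise pvR →
      (l.foldl (fun acc x => PySem.List.insertBy before x acc) acc).Pairwise pvR := by
  intro l
  induction l with
  | nil => intro acc hacc; simpa using hacc
  | cons x t ih =>
    intro acc hacc
    simp only [List.foldl_cons]
    exact ih _ (pv_insB before hb x acc hacc)

lemma pvR_antisymm (a b : List Int) (h1 : pvR a b) (h2 : pvR b a) : a = b := by
  rcases h1 with h1 | ⟨e1, l1⟩ <;> rcases h2 with h2 | ⟨e2, l2⟩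
  · exact absurd h2 (lt_asymm h1)
  · omega
  · omega
  · exact le_antisymm l1 l2

-- A's full lex sort is Pairwise (· ≤ ·)
lemma pv_sorted_le (ts : List (List Int)) :
    (PySem.List.sorted ts (fun x => x) false).Pairwise (· ≤ ·) := by
  have hse : (@PySem.List.sorted (List Int) (List Int) List.instLT (fun a b => a.decidableLT b) ts (fun x => x) false)
      = (@PySem.List.sorted (List Int) (List Int) List.instLinearOrder.toLT LinearOrder.toDecidableLT ts (fun x => x) false) := by
    congr 1
  rw [hse]
  exact PySem.List.sorted_pairwise ts (fun x => x)

-- characterisation of port A: values of the grouping dict are the per-key filters of the sorted list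
lemma pv_A_char (ts : List (List Int)) (hlen : ts.length ≠ 1) :
    order_current_steps ts
      = (PySem.Set.ofList ((PySem.List.sorted ts (fun x => x) false).map
            (fun t => PySem.List.pyGetD t 0 0))).map
          (fun k => PySem.List.sorted
            ((PySem.List.sorted ts (fun x => x) false).filter (fun t => PySem.List.pyGetD t 0 0 == k))
            (fun x => PySem.List.pyGetD x 3 0) false) := by
  unfold order_current_steps
  rw [if_neg hlen]
  have hstep : (fun (d : PySem.Dict Int (List (List Int))) task =>
        let key := PySem.List.pyGetD task 0 0
        let d' := if d.contains key then d else d.insert key []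
        d'.modify key [] (fun g => g ++ [task]))
      = (fun (d : PySem.Dict Int (List (List Int))) task =>
          d.modify (PySem.List.pyGetD task 0 0) [] (fun g => g ++ [task])) := by
    funext d task; exact pv_stepA_eq_modify d task
  simp only [hstep]
  set s := PySem.List.sorted ts (fun x => x) false with hs
  have hkeys : (s.foldl (fun (d : PySem.Dict Int (List (List Int))) task =>
        d.modify (PySem.List.pyGetD task 0 0) [] (fun g => g ++ [task])) PySem.Dict.empty).keys
      = PySem.Set.ofList (s.map (fun t => PySem.List.pyGetD t 0 0)) := by
    have h := PySem.Dict.keys_foldl_modify_key s (fun t => PySem.List.pyGetD t 0 0) []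
      (fun _ x => fun g => g ++ [x]) PySem.Dict.empty
    simpa [PySem.Dict.keys_empty] using h
  have hnodup : (s.foldl (fun (d : PySem.Dict Int (List (List Int))) task =>
        d.modify (PySem.List.pyGetD task 0 0) [] (fun g => g ++ [task])) PySem.Dict.empty).keys.Nodup := by
    apply PySem.Dict.nodup_keys_foldl_modify_key s (fun t => PySem.List.pyGetD t 0 0) []
      (fun _ x => fun g => g ++ [x]) PySem.Dict.empty
    simp [PySem.Dict.keys_empty]
  rw [PySem.Dict.values_eq_map_keys _ hnodup [], hkeys, List.map_map]
  apply List.map_congr_left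
  intro k _
  have hfold : (s.foldl (fun (d : PySem.Dict Int (List (List Int))) task =>
        d.modify (PySem.List.pyGetD task 0 0) [] (fun g => g ++ [task])) PySem.Dict.empty)
      = ((s.map (fun t => (PySem.List.pyGetD t 0 0, t))).foldl
          (fun (d : PySem.Dict Int (List (List Int))) p =>
            d.modify p.1 [] (fun g => g ++ [p.2])) PySem.Dict.empty) := by
    rw [List.foldl_map]
  simp only [Function.comp_apply, hfold]
  rw [show ((s.map (fun t => (PySem.List.pyGetD t 0 0, t))).foldl
          (fun (d : PySem.Dict Int (List (List Int))) p =>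
            d.modify p.1 [] (fun g => g ++ [p.2])) PySem.Dict.empty).getD k []
      = PySem.Dict.empty.getD k []
        ++ (((s.map (fun t => (PySem.List.pyGetD t 0 0, t))).filter (fun p => p.1 == k)).map (fun p => p.2))
    from PySem.Dict.getD_foldl_modify_append _ _ _]
  simp [PySem.Dict.getD_empty, List.filter_map, Function.comp_def, List.map_map]

-- characterisation of port B (just unfolding)
lemma pv_B_char (ts : List (List Int)) (hlen : ts.length ≠ 1) :
    order_current_steps_alt ts
      = (PySem.List.sorted (PySem.Set.ofList (ts.map (fun t => PySem.List.pyGetD t 0 0)))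
            (fun x => x) false).map
          (fun k => PySem.List.sorted2 (ts.filter (fun t => PySem.List.pyGetD t 0 0 == k))
            (fun x => PySem.List.pyGetD x 3 0) (fun x => x) false) := by
  unfold order_current_steps_alt
  rw [if_neg hlen]

-- the two key lists coincide: first occurrences in the sorted list = sorted distinct keys
lemma pv_keys_eq (ts : List (List Int)) (hne : ∀ t ∈ ts, t ≠ []) :
    PySem.Set.ofList ((PySem.List.sorted ts (fun x => x) false).map
        (fun t => PySem.List.pyGetD t 0 0))
      = PySem.List.sorted (PySem.Set.ofList (ts.map (fun t => PySem.List.pyGetD t 0 0)))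
          (fun x => x) false := by
  have hsp := pv_sorted_le ts
  have hmaple : ((PySem.List.sorted ts (fun x => x) false).map
      (fun t => PySem.List.pyGetD t 0 0)).Pairwise (· ≤ ·) := by
    apply List.pairwise_map.mpr
    apply hsp.imp_of_mem
    intro a b ha _ hab
    exact pv_head_le a b hab (hne a ((PySem.List.mem_sorted _ _ _ _).mp ha))
  have h1 : (PySem.Set.ofList ((PySem.List.sorted ts (fun x => x) false).map
      (fun t => PySem.List.pyGetD t 0 0))).Pairwise (· < ·) := by
    have hle := hmaple.sublist (pv_ofList_sublist _)
    have hnd : (PySem.Set.ofList ((PySem.List.sorted ts (fun x => x) false).map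
        (fun t => PySem.List.pyGetD t 0 0))).Nodup := PySem.Set.nodup_ofList _
    exact (hle.and hnd).imp (fun h => lt_of_le_of_ne h.1 h.2)
  have h2 : (PySem.List.sorted (PySem.Set.ofList (ts.map (fun t => PySem.List.pyGetD t 0 0)))
      (fun x => x) false).Pairwise (· < ·) := PySem.List.sorted_ofList_pairwise_lt _
  have hperm : (PySem.Set.ofList ((PySem.List.sorted ts (fun x => x) false).map
      (fun t => PySem.List.pyGetD t 0 0))).Perm
        (PySem.List.sorted (PySem.Set.ofList (ts.map (fun t => PySem.List.pyGetD t 0 0)))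
          (fun x => x) false) := by
    have hnd1 : (PySem.Set.ofList ((PySem.List.sorted ts (fun x => x) false).map
        (fun t => PySem.List.pyGetD t 0 0))).Nodup := PySem.Set.nodup_ofList _
    have hnd2 : (PySem.List.sorted (PySem.Set.ofList (ts.map (fun t => PySem.List.pyGetD t 0 0)))
        (fun x => x) false).Nodup := by
      have hp := PySem.List.sorted_perm (PySem.Set.ofList (ts.map (fun t => PySem.List.pyGetD t 0 0)))
        (fun x => x) false
      exact hp.nodup_iff.mpr (PySem.Set.nodup_ofList _)
    rw [List.perm_ext_iff_of_nodup hnd1 hnd2]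
    intro a
    simp [PySem.Set.mem_ofList, PySem.List.mem_sorted, List.mem_map]
  exact List.Perm.eq_of_pairwise (fun a b _ _ ha hb => absurd hb (lt_asymm ha)) h1 h2 hperm

-- per key, stable x[3]-sort of the lex-sorted filter = composite (x[3], x)-sort of the raw filter
lemma pv_group_eq (ts : List (List Int)) (k : Int) :
    PySem.List.sorted
        ((PySem.List.sorted ts (fun x => x) false).filter (fun t => PySem.List.pyGetD t 0 0 == k))
        (fun x => PySem.List.pyGetD x 3 0) false
      = PySem.List.sorted2 (ts.filter (fun t => PySem.List.pyGetD t 0 0 == k))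
          (fun x => PySem.List.pyGetD x 3 0) (fun x => x) false := by
  set P : List Int → Bool := fun t => PySem.List.pyGetD t 0 0 == k with hP
  have hL : (PySem.List.sorted ((PySem.List.sorted ts (fun x => x) false).filter P)
      (fun x => PySem.List.pyGetD x 3 0) false).Pairwise pvR := by
    rw [PySem.List.sorted_eq_foldl_insertBy]
    apply pv_foldA (fun a b => decide (PySem.List.pyGetD a 3 0 < PySem.List.pyGetD b 3 0))
      (fun a b => by simp [pvK3])
    · exact (pv_sorted_le ts).sublist List.filter_sublist
    · simp
    · simp
  have hR : (PySem.List.sorted2 (ts.filter P)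
      (fun x => PySem.List.pyGetD x 3 0) (fun x => x) false).Pairwise pvR := by
    show (List.foldl (fun acc x => PySem.List.insertBy
        (fun a b => decide (PySem.List.pyGetD a 3 0 < PySem.List.pyGetD b 3 0) ||
          (!decide (PySem.List.pyGetD b 3 0 < PySem.List.pyGetD a 3 0) && decide (a < b)))
        x acc) [] (ts.filter P)).Pairwise pvR
    apply pv_foldB
    · intro a b
      simp [pvK3]
    · simp
  have hperm : (PySem.List.sorted ((PySem.List.sorted ts (fun x => x) false).filter P)
      (fun x => PySem.List.pyGetD x 3 0) false).Perm
        (PySem.List.sorted2 (ts.filter P) (fun x => PySem.List.pyGetD x 3 0) (fun x => x) false) := by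
    have p1 : (PySem.List.sorted ((PySem.List.sorted ts (fun x => x) false).filter P)
        (fun x => PySem.List.pyGetD x 3 0) false).Perm (ts.filter P) :=
      (PySem.List.sorted_perm _ _ _).trans ((PySem.List.sorted_perm ts (fun x => x) false).filter P)
    exact p1.trans (PySem.List.sorted2_perm _ _ _ _).symm
  exact List.Perm.eq_of_pairwise (fun a b _ _ ha hb => pvR_antisymm a b ha hb) hL hR hperm

-- ===== VERDICT (by name: the statement is the Claim_ definition above) =====
theorem order_current_steps_spec : Claim_equal_order_current_steps := by
  intro ts _ hpre
  obtain ⟨hlen, hall⟩ := hpre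
  show order_current_steps ts = order_current_steps_alt ts
  have hne : ∀ t ∈ ts, t ≠ [] := by
    intro t ht hnil
    have := hall t ht
    simp [hnil] at this
  rw [pv_A_char ts hlen, pv_B_char ts hlen, pv_keys_eq ts hne]
  exact List.map_congr_left (fun k _ => pv_group_eq ts k)
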